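-- pv_equiv track=rewrite | github.com/dengguojie/vue-element-admin | ops/built-in/tests/ut/ops_test/MatMulV2/case_util.py | apply_choice
-- ===== SOURCE A (Python) =====
-- from itertools import product
-- import copy
--
-- def apply_choice(base_case, choice):
--     if len(choice) == 0:
--         return base_case
--
--     def apply(case, indices, values):
--         for idx_value, idx in enumerate(indices):
--             case[idx] = values[idx_value]
--         return case
--
--     values = product(*[x[1] for x in choice])
--     indices = [x[0] for x in choice]
--
--     cases = []
--     for value in values:
--         new_case = copy.deepcopy(base_case)
--         cases.append(apply(new_case, indices, value))
--     return cases
-- ===== SOURCE B (Python) =====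
-- import copy
--
-- def apply_choice(base_case, choice):
--     if len(choice) == 0:
--         return base_case
--     if any(len(values) == 0 for _, values in choice):
--         return []  # some dimension has no values: the product of cases is empty
--     cases = [copy.deepcopy(base_case)]
--     for idx, values in choice:
--         next_cases = []
--         for case in cases:
--             for v in values:
--                 new_case = copy.deepcopy(case)
--                 new_case[idx] = v
--                 next_cases.append(new_case)
--         cases = next_cases
--     return cases
-- ===== Notes on version B (the rewrite author's own statement) =====
-- stated objective: alternative
-- what changed: Replaces the itertools.product-of-all-value-tuples plus per-tuple apply loop by an incremental expansion: one pass over choice that multiplies the current list of cases by each dimension's values, setting that index as it goes.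
-- outside the precondition, e.g. on apply_choice([1, 2], []): A returns [1, 2], B returns [1, 2]
import Mathlib
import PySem

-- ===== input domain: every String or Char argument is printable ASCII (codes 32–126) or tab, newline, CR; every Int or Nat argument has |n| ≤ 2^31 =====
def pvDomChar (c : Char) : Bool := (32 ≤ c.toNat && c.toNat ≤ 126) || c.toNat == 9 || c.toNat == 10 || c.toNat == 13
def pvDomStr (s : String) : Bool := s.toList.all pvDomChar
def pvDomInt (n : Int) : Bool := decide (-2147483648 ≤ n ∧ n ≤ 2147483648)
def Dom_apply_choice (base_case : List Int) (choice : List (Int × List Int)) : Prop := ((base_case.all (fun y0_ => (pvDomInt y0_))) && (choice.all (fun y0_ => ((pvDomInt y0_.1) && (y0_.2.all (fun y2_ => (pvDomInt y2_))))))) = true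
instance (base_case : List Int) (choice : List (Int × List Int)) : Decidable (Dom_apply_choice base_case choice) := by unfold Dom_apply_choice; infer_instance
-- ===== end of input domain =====

-- B re-implements the Cartesian expansion incrementally (one pass multiplying the case list per
-- choice dimension) instead of materialising all itertools.product tuples and applying each.

-- ===== PORT A =====
-- itertools.product over the value lists (first dimension slowest, exactly product's order)
def pvProd : List (List Int) → List (List Int)
  | [] => [[]]
  | l :: ls => l.flatMap (fun v => (pvProd ls).map (fun t => v :: t))

-- inner 'apply': for idx_value, idx in enumerate(indices): case[idx] = values[idx_value].
-- enumerate+values[idx_value] is rendered as a fold over the zip: exact, since len(values) =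
-- len(indices) by construction of product. case[idx]=v is pySetD (exact under Pre_'s InRange).
def pvApplyA (case_ : List Int) (indices values : List Int) : List Int :=
  (indices.zip values).foldl (fun c p => PySem.List.pySetD c p.1 p.2) case_

def apply_choice (base_case : List Int) (choice : List (Int × List Int)) : List (List Int) :=
  if choice.isEmpty then [base_case]  -- Python returns base_case itself (not a list of lists); choice = [] is excluded by Pre_
  else
    let values := pvProd (choice.map (fun x => x.2))
    let indices := choice.map (fun x => x.1)
    values.map (fun value => pvApplyA base_case indices value)

-- ===== PORT B =====
-- one expansion step: every existing case × every value of this dimension, index set to the value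
def pvStep (cases : List (List Int)) (c : Int × List Int) : List (List Int) :=
  cases.flatMap (fun case_ => c.2.map (fun v => PySem.List.pySetD case_ c.1 v))

def apply_choice_alt (base_case : List Int) (choice : List (Int × List Int)) : List (List Int) :=
  if choice.isEmpty then [base_case]  -- Python returns base_case itself (not a list of lists); choice = [] is excluded by Pre_
  else if choice.any (fun c => c.2.isEmpty) then []  -- some dimension empty: empty product
  else choice.foldl pvStep [base_case]

-- ===== PRECONDITION & SPEC =====
-- Pre_ excludes (a) choice = [], where A returns base_case itself — a flat list, not a value of the
-- declared List (List Int) result type — and (b) inputs where Python's case[idx] = v raises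
-- IndexError: some index out of range of base_case while every value list is non-empty (if any
-- value list is empty the product is empty, no assignment runs, and A returns [] normally).
def Pre_apply_choice (base_case : List Int) (choice : List (Int × List Int)) : Prop :=
  choice ≠ [] ∧
    ((∃ p ∈ choice, p.2 = []) ∨ ∀ p ∈ choice, PySem.Raise.InRange base_case.length p.1)
instance (base_case : List Int) (choice : List (Int × List Int)) : Decidable (Pre_apply_choice base_case choice) := by unfold Pre_apply_choice; infer_instance
def pvWitness_apply_choice : List Int × (List (Int × List Int)) := ([1, 2, 3], [(0, [7, 8]), (-1, [9])])

def Spec_apply_choice (base_case : List Int) (choice : List (Int × List Int)) (out : List (List Int)) : Prop := out = apply_choice_alt base_case choice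
instance (base_case : List Int) (choice : List (Int × List Int)) (out : List (List Int)) : Decidable (Spec_apply_choice base_case choice out) := by unfold Spec_apply_choice; infer_instance

-- ===== CLAIM (what is proved, stated in full; the proofs are below) =====
def Claim_equal_apply_choice : Prop := ∀ (base_case : List Int) (choice : List (Int × List Int)), Dom_apply_choice base_case choice → Pre_apply_choice base_case choice → Spec_apply_choice base_case choice (apply_choice base_case choice)

-- ===== LEMMAS AND PROOFS =====

-- folding the expansion steps distributes over the current case list
theorem pvStep_foldl_flatMap (rest : List (Int × List Int)) (cases : List (List Int)) :
    rest.foldl pvStep cases = cases.flatMap (fun c => rest.foldl pvStep [c]) := by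
  induction rest generalizing cases with
  | nil => simp
  | cons x rest ih =>
    simp only [List.foldl_cons]
    rw [ih]
    have h2 : cases.flatMap (fun c => rest.foldl pvStep (pvStep [c] x))
        = cases.flatMap (fun c => (pvStep [c] x).flatMap (fun c' => rest.foldl pvStep [c'])) :=
      List.flatMap_congr (fun c _ => ih _)
    rw [h2]
    simp [pvStep, List.flatMap_assoc]

-- A's map-over-product equals B's fold of expansion steps
theorem pvProd_map_eq_foldl (choice : List (Int × List Int)) (base : List Int) :
    (pvProd (choice.map (fun x => x.2))).map
        (fun value => pvApplyA base (choice.map (fun x => x.1)) value)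
      = choice.foldl pvStep [base] := by
  induction choice generalizing base with
  | nil => simp [pvProd, pvApplyA]
  | cons c rest ih =>
    simp only [List.map_cons, pvProd, List.map_flatMap, List.map_map, List.foldl_cons]
    have hstep : pvStep [base] c = c.2.map (fun v => PySem.List.pySetD base c.1 v) := by
      simp [pvStep]
    rw [pvStep_foldl_flatMap rest (pvStep [base] c), hstep, List.flatMap_map]
    apply List.flatMap_congr
    intro v _
    have happ : ∀ t : List Int, pvApplyA base (c.1 :: rest.map (fun x => x.1)) (v :: t)
        = pvApplyA (PySem.List.pySetD base c.1 v) (rest.map (fun x => x.1)) t := by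
      intro t
      simp [pvApplyA]
    simp only [Function.comp_def, happ]
    exact ih (PySem.List.pySetD base c.1 v)

-- the product is empty as soon as one dimension is empty
theorem pvProd_nil (ls : List (List Int)) (h : ∃ l ∈ ls, l = []) : pvProd ls = [] := by
  induction ls with
  | nil => simp at h
  | cons l ls ih =>
    rcases h with ⟨m, hm, hme⟩
    rcases List.mem_cons.1 hm with h1 | h1
    · subst h1; subst hme; simp [pvProd]
    · simp [pvProd, ih ⟨m, h1, hme⟩]

-- ===== VERDICT (by name: the statement is the Claim_ definition above) =====
theorem apply_choice_spec : Claim_equal_apply_choice := by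
  intro base_case choice _ _
  unfold Spec_apply_choice apply_choice apply_choice_alt
  by_cases h : choice.isEmpty
  · simp [h]
  · simp only [h, Bool.false_eq_true, if_false]
    by_cases he : choice.any (fun c => c.2.isEmpty)
    · have hnil : pvProd (choice.map (fun x => x.2)) = [] := by
        apply pvProd_nil
        rcases List.any_eq_true.1 he with ⟨c, hc, hce⟩
        exact ⟨c.2, List.mem_map_of_mem hc, List.isEmpty_iff.1 hce⟩
      simp [he, hnil]
    · simp only [he, Bool.false_eq_true, if_false]
      exact pvProd_map_eq_foldl choice base_case
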